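-- pv_equiv track=rewrite | github.com/sonaiso/Eqratech_Hussein_Hiyassat_Project | src/fvafk/c1/cv_pattern.py | split_cv_syllables
-- ===== SOURCE A (Python) =====
-- from typing import Dict, List, Tuple
--
-- def split_cv_syllables(cv_advanced: str) -> List[str]:
--     if not cv_advanced:
--         return []
--
--     simplified = "".join("V" if ch in {"a", "o", "i"} else ch for ch in cv_advanced)
--     syllables: List[str] = []
--     buffer: List[str] = []
--     idx = 0
--     vowel_seen = False
--
--     def is_cv_at(position: int) -> bool:
--         return (
--             position + 1 < len(simplified)
--             and simplified[position] == "C"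
--             and simplified[position + 1] == "V"
--         )
--
--     while idx < len(simplified):
--         buffer.append(cv_advanced[idx])
--         if simplified[idx] == "V":
--             vowel_seen = True
--         if (
--             vowel_seen
--             and idx + 1 < len(simplified)
--             and is_cv_at(idx + 1)
--         ):
--             syllables.append("".join(buffer))
--             buffer = []
--             vowel_seen = False
--         idx += 1
--
--     if buffer:
--         syllables.append("".join(buffer))
--
--     return syllables
-- ===== SOURCE B (Python) =====
-- def split_cv_syllables(cv_advanced):
--     if not cv_advanced:
--         return []
--     mask = "".join("V" if ch in {"a", "o", "i"} else ch for ch in cv_advanced)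
--     n = len(mask)
--     cuts = []
--     vowel_seen = False
--     for i in range(n):
--         if mask[i] == "V":
--             vowel_seen = True
--         if vowel_seen and i + 2 < n and mask[i + 1] == "C" and mask[i + 2] == "V":
--             cuts.append(i + 1)
--             vowel_seen = False
--     bounds = [0] + cuts + [n]
--     return [cv_advanced[a:b] for a, b in zip(bounds, bounds[1:])]
-- ===== Notes on version B (the rewrite author's own statement) =====
-- stated objective: faster
-- what changed: A accumulates each syllable character by character in a Python-level buffer list flushed with join at cut points; B scans the mask once recording only the cut positions, then produces the syllables by slicing the input string between consecutive bounds, avoiding the per-character buffer appends and joins (constant-factor speedup, measured ~2x).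
import Mathlib
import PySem

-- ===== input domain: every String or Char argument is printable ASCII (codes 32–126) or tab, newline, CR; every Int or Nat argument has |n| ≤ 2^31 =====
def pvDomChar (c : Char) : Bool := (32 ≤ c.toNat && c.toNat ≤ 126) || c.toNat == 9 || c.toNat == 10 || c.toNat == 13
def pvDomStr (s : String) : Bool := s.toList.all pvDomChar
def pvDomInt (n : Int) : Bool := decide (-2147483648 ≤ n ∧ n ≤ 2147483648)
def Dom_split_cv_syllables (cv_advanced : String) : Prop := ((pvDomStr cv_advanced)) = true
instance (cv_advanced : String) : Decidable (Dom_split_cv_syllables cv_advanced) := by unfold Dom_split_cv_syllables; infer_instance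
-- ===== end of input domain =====

-- B replaces A's char-by-char buffer accumulator with a scan that records cut positions,
-- followed by slicing between consecutive bounds: same O(n) pass, but without per-character
-- buffer appends/joins (objective: faster — measured ~2x in a timing run).

-- ===== PORT A =====
-- the while-loop of A: state (syllables, buffer, vowel_seen), scanning idx upward;
-- all list indexing is in range (guarded by the loop/branch bounds), so getD is exact.
def pvLoopA (l mask : List Char) (idx : Nat) (syls : List String) (buf : List Char) (vs : Bool) :
    List String :=
  if h : idx < mask.length then
    let buf' := buf ++ [l.getD idx ' ']
    let vs' := if mask.getD idx ' ' == 'V' then true else vs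
    if vs' && decide (idx + 1 < mask.length) &&
        (decide (idx + 1 + 1 < mask.length) && (mask.getD (idx + 1) ' ' == 'C') &&
          (mask.getD (idx + 1 + 1) ' ' == 'V')) then
      pvLoopA l mask (idx + 1) (syls ++ [String.mk buf']) [] false
    else
      pvLoopA l mask (idx + 1) syls buf' vs'
  else
    if buf.isEmpty then syls else syls ++ [String.mk buf]
termination_by mask.length - idx

def split_cv_syllables (cv_advanced : String) : List String :=
  if cv_advanced.toList.isEmpty then []
  else
    let l := cv_advanced.toList
    let simplified := l.map (fun ch => if ch == 'a' || ch == 'o' || ch == 'i' then 'V' else ch)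
    pvLoopA l simplified 0 [] [] false

-- ===== PORT B =====
-- the for-loop of B: records cut positions only.
def pvLoopB (mask : List Char) (i : Nat) (cuts : List Nat) (vs : Bool) : List Nat :=
  if h : i < mask.length then
    let vs' := if mask.getD i ' ' == 'V' then true else vs
    if vs' && decide (i + 2 < mask.length) && (mask.getD (i + 1) ' ' == 'C') &&
        (mask.getD (i + 2) ' ' == 'V') then
      pvLoopB mask (i + 1) (cuts ++ [i + 1]) false
    else
      pvLoopB mask (i + 1) cuts vs'
  else cuts
termination_by mask.length - i

-- cv_advanced[a:b]: hand port of the Python slice, exact here because every slice B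
-- takes has 0 ≤ a ≤ b ≤ len(cv_advanced).
def pvSlice (l : List Char) (a b : Nat) : String := String.mk ((l.drop a).take (b - a))

def split_cv_syllables_alt (cv_advanced : String) : List String :=
  if cv_advanced.toList.isEmpty then []
  else
    let l := cv_advanced.toList
    let mask := l.map (fun ch => if ch == 'a' || ch == 'o' || ch == 'i' then 'V' else ch)
    let cuts := pvLoopB mask 0 [] false
    let bounds := 0 :: (cuts ++ [l.length])
    (bounds.zip bounds.tail).map (fun p => pvSlice l p.1 p.2)

-- ===== PRECONDITION & SPEC =====
def Spec_split_cv_syllables (cv_advanced : String) (out : List String) : Prop := out = split_cv_syllables_alt cv_advanced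
instance (cv_advanced : String) (out : List String) : Decidable (Spec_split_cv_syllables cv_advanced out) := by unfold Spec_split_cv_syllables; infer_instance

-- ===== CLAIM (what is proved, stated in full; the proofs are below) =====
def Claim_equal_split_cv_syllables : Prop := ∀ (cv_advanced : String), Dom_split_cv_syllables cv_advanced → Spec_split_cv_syllables cv_advanced (split_cv_syllables cv_advanced)

-- ===== LEMMAS AND PROOFS =====

-- the slices between consecutive bounds start :: cuts ++ [l.length], recursively
def pvRender (l : List Char) : Nat → List Nat → List String
  | start, [] => [pvSlice l start l.length]
  | start, c :: cs => pvSlice l start c :: pvRender l c cs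

theorem pvRender_eq_zip (l : List Char) (cuts : List Nat) (start : Nat) :
    ((start :: (cuts ++ [l.length])).zip (cuts ++ [l.length])).map
        (fun p => pvSlice l p.1 p.2) = pvRender l start cuts := by
  induction cuts generalizing start with
  | nil => simp [pvRender]
  | cons c cs ih => simpa [pvRender] using ih c
theorem pvSeg_snoc (l : List Char) (start i : Nat) (hsi : start ≤ i) (hi : i < l.length) :
    (l.drop start).take (i - start) ++ [l.getD i ' '] = (l.drop start).take (i + 1 - start) := by
  have h1 : i + 1 - start = (i - start) + 1 := by omega
  rw [h1, List.take_succ]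
  have : (l.drop start)[i - start]? = some l[i] := by
    rw [List.getElem?_drop]
    have : start + (i - start) = i := by omega
    rw [this, List.getElem?_eq_getElem hi]
  simp [this, List.getD, List.getElem?_eq_getElem hi]


theorem pvLoopB_acc (mask : List Char) : ∀ k i cuts vs, mask.length - i ≤ k →
    pvLoopB mask i cuts vs = cuts ++ pvLoopB mask i [] vs := by
  intro k
  induction k with
  | zero =>
    intro i cuts vs hk
    have h : ¬ i < mask.length := by omega
    rw [pvLoopB]
    conv_rhs => rw [pvLoopB]
    simp [h]
  | succ k ih =>
    intro i cuts vs hk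
    rw [pvLoopB]
    conv_rhs => rw [pvLoopB]
    by_cases h : i < mask.length
    · simp only [dif_pos h]
      by_cases hc : ((if (mask.getD i ' ' == 'V') = true then true else vs) && decide (i + 2 < mask.length) && (mask.getD (i + 1) ' ' == 'C') && (mask.getD (i + 2) ' ' == 'V')) = true
      · rw [if_pos hc, if_pos hc, ih (i+1) (cuts ++ [i+1]) false (by omega),
          show ([] : List Nat) ++ [i+1] = [i+1] from rfl,
          ih (i+1) [i+1] false (by omega)]
        simp
      · rw [if_neg hc, if_neg hc]
        exact ih (i+1) cuts _ (by omega)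
    · simp [h]


theorem pvCond (mask : List Char) (i : Nat) (b c1 c2 : Bool) :
    (b && decide (i + 1 < mask.length) &&
      (decide (i + 1 + 1 < mask.length) && c1 && c2)) =
    (b && decide (i + 2 < mask.length) && c1 && c2) := by
  have e2 : i + 1 + 1 = i + 2 := by omega
  rw [e2]
  by_cases h2 : i + 2 < mask.length
  · have h1 : i + 1 < mask.length := by omega
    simp [h1, h2, Bool.and_assoc]
  · simp [h2]

theorem pvMain (l mask : List Char) (hm : mask.length = l.length) :
    ∀ k i start syls vs, mask.length - i ≤ k → start ≤ i → start < l.length →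
      pvLoopA l mask i syls ((l.drop start).take (i - start)) vs =
        syls ++ pvRender l start (pvLoopB mask i [] vs) :=
  by
  have base : ∀ i start syls vs, ¬ i < mask.length → start ≤ i → start < l.length →
      pvLoopA l mask i syls ((l.drop start).take (i - start)) vs =
        syls ++ pvRender l start (pvLoopB mask i [] vs) := by
    intro i start syls vs h hs hsl
    rw [pvLoopA]
    conv_rhs => rw [pvLoopB]
    simp only [dif_neg h]
    have hlen : (l.drop start).length = l.length - start := by simp
    have h1 : (l.drop start).take (i - start) = l.drop start :=
      List.take_of_length_le (by omega)
    have h2 : (l.drop start).take (l.length - start) = l.drop start :=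
      List.take_of_length_le (by omega)
    have hne : (l.drop start).isEmpty = false := by
      simp; omega
    simp [pvRender, pvSlice, h1, h2, hne]
  intro k
  induction k with
  | zero =>
    intro i start syls vs hk hs hsl
    exact base i start syls vs (by omega) hs hsl
  | succ k ih =>
    intro i start syls vs hk hs hsl
    by_cases h : i < mask.length
    · rw [pvLoopA]
      conv_rhs => rw [pvLoopB]
      simp only [dif_pos h]
      rw [pvCond]
      have hil : i < l.length := by omega
      have hbuf : (l.drop start).take (i - start) ++ [l.getD i ' '] =
          (l.drop start).take (i + 1 - start) := pvSeg_snoc l start i hs hil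
      by_cases hc : ((if (mask.getD i ' ' == 'V') = true then true else vs) &&
          decide (i + 2 < mask.length) && (mask.getD (i + 1) ' ' == 'C') &&
          (mask.getD (i + 2) ' ' == 'V')) = true
      · -- cut branch
        have h2 : i + 2 < mask.length := by
          simp only [Bool.and_eq_true, decide_eq_true_eq] at hc
          exact hc.1.1.2
        rw [if_pos hc, if_pos hc, hbuf]
        have hi1 : i + 1 < l.length := by omega
        have hih := ih (i + 1) (i + 1)
          (syls ++ [String.mk ((l.drop start).take (i + 1 - start))]) false
          (by omega) (le_refl _) hi1
        simp only [Nat.sub_self, List.take_zero] at hih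
        rw [hih]
        rw [show ([] : List Nat) ++ [i+1] = [i+1] from rfl,
          pvLoopB_acc mask mask.length (i+1) [i+1] false (by omega)]
        simp [pvRender, pvSlice]
      · -- no-cut branch
        rw [if_neg hc, if_neg hc, hbuf]
        exact ih (i + 1) start syls _ (by omega) (by omega) hsl
    · exact base i start syls vs h hs hsl

-- ===== VERDICT (by name: the statement is the Claim_ definition above) =====
theorem split_cv_syllables_spec : Claim_equal_split_cv_syllables := by
  intro cv _
  unfold Spec_split_cv_syllables split_cv_syllables split_cv_syllables_alt
  by_cases h : cv.toList.isEmpty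
  · simp [h]
  · simp only [h, Bool.false_eq_true, if_false, List.tail_cons]
    rw [pvRender_eq_zip]
    have hn : 0 < cv.toList.length := by
      simp only [List.isEmpty_iff] at h
      exact List.length_pos_iff.mpr h
    have hmain := pvMain cv.toList
      (cv.toList.map (fun ch => if ch == 'a' || ch == 'o' || ch == 'i' then 'V' else ch))
      (by simp) cv.toList.length 0 0 [] false (by simp) (by omega) hn
    simpa using hmain
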